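-- pv_equiv track=rewrite | github.com/bipinthecoder/anomaly-driven-video-summarization | utils/video_summarization_helper_functions.py | append_middle_buffer_frames
-- ===== SOURCE A (Python) =====
-- def append_middle_buffer_frames(frame_key_list):
--     final_frames_list = []
--     for i in range(len(frame_key_list)):
--         if i == 0 or i == len(frame_key_list) - 1:
--             final_frames_list.append(frame_key_list[i])
--         elif frame_key_list[i] != frame_key_list[i - 1]:
--             final_frames_list.append(frame_key_list[i] - 1)
--             final_frames_list.append(frame_key_list[i])
--         else:
--             final_frames_list.append(frame_key_list[i])
--     final_frames_list = set(final_frames_list)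
--     final_frames_list = sorted(list(final_frames_list))
--     return final_frames_list
-- ===== SOURCE B (Python) =====
-- def append_middle_buffer_frames(frame_key_list):
--     # Maintain a strictly increasing result list online by ordered insertion
--     # (binary search for the position): no set, no final sort.
--     result = []
--
--     def insert_unique(x):
--         lo, hi = 0, len(result)
--         while lo < hi:
--             mid = (lo + hi) // 2
--             if result[mid] < x:
--                 lo = mid + 1
--             else:
--                 hi = mid
--         if lo == len(result) or result[lo] != x:
--             result.insert(lo, x)
--
--     n = len(frame_key_list)
--     for i, x in enumerate(frame_key_list):
--         if 0 < i < n - 1 and x != frame_key_list[i - 1]: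
--             insert_unique(x - 1)
--         insert_unique(x)
--     return result
-- ===== Notes on version B (the rewrite author's own statement) =====
-- stated objective: alternative
-- what changed: B replaces A's append-everything-then-set()-then-sorted() pipeline with an online ordered-insertion algorithm: it maintains a strictly increasing duplicate-free result list throughout the single pass, inserting each frame (and the buffer frame value-1 at middle change points) at its sorted position, so no set and no final sort exist.
import Mathlib
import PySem

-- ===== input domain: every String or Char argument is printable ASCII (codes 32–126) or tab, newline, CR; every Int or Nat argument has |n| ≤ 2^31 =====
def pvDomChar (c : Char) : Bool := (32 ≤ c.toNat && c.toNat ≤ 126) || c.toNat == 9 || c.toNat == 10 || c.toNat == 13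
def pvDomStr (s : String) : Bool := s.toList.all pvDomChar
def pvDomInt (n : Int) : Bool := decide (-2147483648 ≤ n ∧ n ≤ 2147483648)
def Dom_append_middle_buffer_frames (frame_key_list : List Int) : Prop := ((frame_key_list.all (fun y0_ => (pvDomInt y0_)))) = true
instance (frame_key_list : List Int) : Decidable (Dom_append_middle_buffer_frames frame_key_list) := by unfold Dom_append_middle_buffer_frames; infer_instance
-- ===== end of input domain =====

-- B replaces A's append-all / set() / sorted() pipeline with online ordered insertion into a
-- strictly increasing duplicate-free list (no set, no final sort); return value only.

-- ===== PORT A =====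
def append_middle_buffer_frames (frame_key_list : List Int) : List Int :=
  let n : Int := frame_key_list.length
  let final_frames_list :=
    (PySem.List.pyRange 0 n 1).foldl (fun acc i =>
      if i == 0 || i == n - 1 then
        acc ++ [PySem.List.pyGetD frame_key_list i 0]
      else if PySem.List.pyGetD frame_key_list i 0 != PySem.List.pyGetD frame_key_list (i - 1) 0 then
        acc ++ [PySem.List.pyGetD frame_key_list i 0 - 1, PySem.List.pyGetD frame_key_list i 0]
      else
        acc ++ [PySem.List.pyGetD frame_key_list i 0]) []
  PySem.List.sorted (PySem.Set.ofList final_frames_list) (fun x => x) false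

-- ===== PORT B =====
-- insert_unique's while loop: binary search for the first position whose element is ≥ x
def bisectLo (result : List Int) (x : Int) (lo hi : Nat) : Nat :=
  if _h : lo < hi then
    let mid := (lo + hi) / 2
    if result.getD mid 0 < x then bisectLo result x (mid + 1) hi
    else bisectLo result x lo mid
  else lo
termination_by hi - lo
decreasing_by all_goals omega

-- insert_unique: binary search + conditional list.insert (drops x if already present)
def insertUnique (result : List Int) (x : Int) : List Int :=
  let lo := bisectLo result x 0 result.length
  if lo == result.length || (result.getD lo 0 != x) then
    PySem.List.insert result (lo : Int) x
  else result

def append_middle_buffer_frames_alt (frame_key_list : List Int) : List Int :=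
  let n : Int := frame_key_list.length
  (PySem.List.enumerate frame_key_list 0).foldl (fun result p =>
    let result :=
      if decide (0 < p.1) && decide (p.1 < n - 1) &&
         (p.2 != PySem.List.pyGetD frame_key_list (p.1 - 1) 0) then
        insertUnique result (p.2 - 1)
      else result
    insertUnique result p.2) []

-- ===== PRECONDITION & SPEC =====
def Spec_append_middle_buffer_frames (frame_key_list : List Int) (out : List Int) : Prop := out = append_middle_buffer_frames_alt frame_key_list
instance (frame_key_list : List Int) (out : List Int) : Decidable (Spec_append_middle_buffer_frames frame_key_list out) := by unfold Spec_append_middle_buffer_frames; infer_instance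

-- ===== CLAIM (what is proved, stated in full; the proofs are below) =====
def Claim_equal_append_middle_buffer_frames : Prop := ∀ (frame_key_list : List Int), Dom_append_middle_buffer_frames frame_key_list → Spec_append_middle_buffer_frames frame_key_list (append_middle_buffer_frames frame_key_list)

-- ===== LEMMAS AND PROOFS =====

-- sorted lists are index-monotone
theorem getD_lt_getD {res : List Int} (hres : res.Pairwise (· < ·)) {i j : Nat}
    (hij : i < j) (hj : j < res.length) : res.getD i 0 < res.getD j 0 := by
  rw [List.getD_eq_getElem res 0 (by omega), List.getD_eq_getElem res 0 hj]
  exact List.pairwise_iff_getElem.mp hres i j (by omega) hj hij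

-- what the binary search returns: the first position whose element is ≥ x
theorem bisectLo_spec (res : List Int) (x : Int) (hres : res.Pairwise (· < ·)) :
    ∀ n lo hi, hi - lo = n → hi ≤ res.length → lo ≤ hi →
      (∀ i < lo, res.getD i 0 < x) →
      (∀ i, hi ≤ i → i < res.length → ¬ res.getD i 0 < x) →
      (∀ i < bisectLo res x lo hi, res.getD i 0 < x) ∧
      (∀ i, bisectLo res x lo hi ≤ i → i < res.length → ¬ res.getD i 0 < x) ∧
      bisectLo res x lo hi ≤ res.length := by
  intro n
  induction n using Nat.strong_induction_on with
  | _ n ih =>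
    intro lo hi hn hhi hlohi hlow hhigh
    rw [bisectLo]
    by_cases h : lo < hi
    · simp only [h, dif_pos]
      by_cases hm : res.getD ((lo + hi) / 2) 0 < x
      · simp only [hm, if_pos]
        refine ih (hi - ((lo + hi) / 2 + 1)) (by omega) _ _ rfl hhi (by omega) ?_ hhigh
        intro i hi'
        rcases Nat.lt_or_ge i lo with h' | h'
        · exact hlow i h'
        · rcases Nat.lt_or_ge i ((lo + hi) / 2) with h'' | h''
          · exact lt_trans (getD_lt_getD hres h'' (by omega)) hm
          · have : i = (lo + hi) / 2 := by omega
            exact this ▸ hm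
      · simp only [hm, if_false]
        refine ih ((lo + hi) / 2 - lo) (by omega) _ _ rfl (by omega) (by omega) hlow ?_
        intro i hge hilen
        rcases Nat.lt_or_ge i hi with h' | h'
        · intro hlt
          rcases Nat.eq_or_lt_of_le hge with h'' | h''
          · exact hm (h'' ▸ hlt)
          · exact hm (lt_trans (getD_lt_getD hres h'' (by omega)) hlt)
        · exact hhigh i h' hilen
    · simp only [h, dif_neg, not_false_iff]
      exact ⟨hlow, fun i hge hilen => hhigh i (by omega) hilen, by omega⟩

-- membership in insertUnique (on a strictly sorted list)
theorem mem_insertUnique (res : List Int) (x y : Int) (hres : res.Pairwise (· < ·)) :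
    y ∈ insertUnique res x ↔ y = x ∨ y ∈ res := by
  unfold insertUnique
  dsimp only
  obtain ⟨hlow, hhigh, hle⟩ := bisectLo_spec res x hres (res.length - 0) 0 res.length rfl
    le_rfl (Nat.zero_le _) (by omega) (by omega)
  set lo := bisectLo res x 0 res.length with hlo
  split_ifs with hc
  · rw [PySem.List.insert_natCast res lo x hle]
    have hsplit := List.take_append_drop lo res
    constructor
    · intro hy
      rcases List.mem_append.mp hy with hy | hy
      · exact Or.inr (by rw [← hsplit]; exact List.mem_append.mpr (Or.inl hy))
      · rcases List.mem_cons.mp hy with rfl | hy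
        · exact Or.inl rfl
        · exact Or.inr (by rw [← hsplit]; exact List.mem_append.mpr (Or.inr hy))
    · rintro (rfl | hy)
      · exact List.mem_append.mpr (Or.inr (List.mem_cons_self))
      · rw [← hsplit] at hy
        rcases List.mem_append.mp hy with hy | hy
        · exact List.mem_append.mpr (Or.inl hy)
        · exact List.mem_append.mpr (Or.inr (List.mem_cons_of_mem _ hy))
  · -- x is already present: res.getD lo 0 = x with lo < res.length
    simp only [beq_iff_eq, bne_iff_ne, ne_eq, Bool.or_eq_true, not_or, not_not] at hc
    have hlt : lo < res.length := by
      rcases Nat.lt_or_ge lo res.length with h | h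
      · exact h
      · omega
    have hx : x ∈ res := by
      have := hc.2
      rw [List.getD_eq_getElem res 0 hlt] at this
      exact this ▸ List.getElem_mem hlt
    constructor
    · exact fun hy => Or.inr hy
    · rintro (rfl | hy)
      · exact hx
      · exact hy

-- insertUnique preserves strict sortedness
theorem pairwise_insertUnique (res : List Int) (x : Int) (hres : res.Pairwise (· < ·)) :
    (insertUnique res x).Pairwise (· < ·) := by
  unfold insertUnique
  dsimp only
  obtain ⟨hlow, hhigh, hle⟩ := bisectLo_spec res x hres (res.length - 0) 0 res.length rfl
    le_rfl (Nat.zero_le _) (by omega) (by omega)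
  set lo := bisectLo res x 0 res.length with hlo
  split_ifs with hc
  · rw [PySem.List.insert_natCast res lo x hle]
    have htake : ∀ a ∈ res.take lo, a < x := by
      intro a ha
      obtain ⟨i, hi, rfl⟩ := List.mem_iff_getElem.mp ha
      rw [List.getElem_take]
      have hilen : i < res.length := lt_of_lt_of_le (lt_of_lt_of_le hi (by simp)) le_rfl
      rw [← List.getD_eq_getElem res 0 hilen]
      exact hlow i (by simp at hi; omega)
    have hdrop : ∀ b ∈ res.drop lo, x < b := by
      intro b hb
      obtain ⟨i, hi, rfl⟩ := List.mem_iff_getElem.mp hb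
      rw [List.getElem_drop]
      have hilen : lo + i < res.length := by simp at hi; omega
      rw [← List.getD_eq_getElem res 0 hilen]
      have hge : ¬ res.getD (lo + i) 0 < x := hhigh (lo + i) (by omega) hilen
      have hne : res.getD (lo + i) 0 ≠ x := by
        intro heq
        -- then res.getD lo 0 = x contradicting hc unless lo = lo + i; either way hc is violated
        rcases Nat.eq_or_lt_of_le (Nat.le_add_right lo i) with h' | h'
        · simp only [beq_iff_eq, bne_iff_ne, ne_eq, Bool.or_eq_true] at hc
          rcases hc with h'' | h''
          · omega
          · exact h'' (h' ▸ heq)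
        · have := getD_lt_getD hres h' hilen
          have hgelo : ¬ res.getD lo 0 < x := hhigh lo le_rfl (by omega)
          omega
      omega
    rw [List.pairwise_append]
    refine ⟨List.Pairwise.sublist (List.take_sublist _ _) hres, ?_, ?_⟩
    · rw [List.pairwise_cons]
      exact ⟨hdrop, List.Pairwise.sublist (List.drop_sublist _ _) hres⟩
    · intro a ha b hb
      rcases List.mem_cons.mp hb with rfl | hb
      · exact htake a ha
      · exact lt_trans (htake a ha) (hdrop b hb)
  · exact hres

-- B's fold: membership and sortedness together
theorem foldl_ins_spec {c : Int × Int → Bool} (l : List (Int × Int)) (res : List Int)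
    (hres : res.Pairwise (· < ·)) :
    (l.foldl (fun res p =>
        insertUnique (if c p then insertUnique res (p.2 - 1) else res) p.2) res).Pairwise (· < ·) ∧
    ∀ y, (y ∈ l.foldl (fun res p =>
        insertUnique (if c p then insertUnique res (p.2 - 1) else res) p.2) res ↔
      y ∈ res ∨ ∃ p ∈ l, y = p.2 ∨ (c p = true ∧ y = p.2 - 1)) := by
  induction l generalizing res with
  | nil => simpa using hres
  | cons a t ih =>
    simp only [List.foldl_cons]
    have hstep : ((if c a then insertUnique res (a.2 - 1) else res)).Pairwise (· < ·) := by
      split_ifs with hc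
      · exact pairwise_insertUnique _ _ hres
      · exact hres
    have hnext := pairwise_insertUnique _ a.2 hstep
    obtain ⟨hp, hm⟩ := ih _ hnext
    refine ⟨hp, fun y => ?_⟩
    rw [hm y, mem_insertUnique _ _ _ hstep]
    by_cases hc : c a <;>
      simp only [hc, if_true, Bool.false_eq_true, if_false, mem_insertUnique _ _ _ hres,
        List.mem_cons] <;> aesop

-- A's per-index appended block
def gA (xs : List Int) (i : Int) : List Int :=
  if i == 0 || i == (xs.length : Int) - 1 then [PySem.List.pyGetD xs i 0]
  else if PySem.List.pyGetD xs i 0 != PySem.List.pyGetD xs (i - 1) 0 then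
    [PySem.List.pyGetD xs i 0 - 1, PySem.List.pyGetD xs i 0]
  else [PySem.List.pyGetD xs i 0]

theorem foldA_eq_flatMap (xs : List Int) :
    (PySem.List.pyRange 0 (xs.length : Int) 1).foldl (fun acc i =>
      if i == 0 || i == (xs.length : Int) - 1 then
        acc ++ [PySem.List.pyGetD xs i 0]
      else if PySem.List.pyGetD xs i 0 != PySem.List.pyGetD xs (i - 1) 0 then
        acc ++ [PySem.List.pyGetD xs i 0 - 1, PySem.List.pyGetD xs i 0]
      else
        acc ++ [PySem.List.pyGetD xs i 0]) [] =
    (PySem.List.pyRange 0 (xs.length : Int) 1).flatMap (gA xs) := by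
  have h : ∀ (acc : List Int) (i : Int),
      (if i == 0 || i == (xs.length : Int) - 1 then
        acc ++ [PySem.List.pyGetD xs i 0]
      else if PySem.List.pyGetD xs i 0 != PySem.List.pyGetD xs (i - 1) 0 then
        acc ++ [PySem.List.pyGetD xs i 0 - 1, PySem.List.pyGetD xs i 0]
      else
        acc ++ [PySem.List.pyGetD xs i 0]) = acc ++ gA xs i := by
    intro acc i
    unfold gA
    split_ifs <;> rfl
  calc (PySem.List.pyRange 0 (xs.length : Int) 1).foldl (fun acc i =>
      if i == 0 || i == (xs.length : Int) - 1 then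
        acc ++ [PySem.List.pyGetD xs i 0]
      else if PySem.List.pyGetD xs i 0 != PySem.List.pyGetD xs (i - 1) 0 then
        acc ++ [PySem.List.pyGetD xs i 0 - 1, PySem.List.pyGetD xs i 0]
      else
        acc ++ [PySem.List.pyGetD xs i 0]) []
      = (PySem.List.pyRange 0 (xs.length : Int) 1).foldl (fun acc i => acc ++ gA xs i) [] := by
        exact PySem.List.foldl_congr_mem _ _ _ _ (fun acc x _ => h acc x)
    _ = (PySem.List.pyRange 0 (xs.length : Int) 1).flatMap (gA xs) := by
        exact PySem.List.foldl_append_eq_flatMap _ _ _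

-- membership in the list ↔ indexed form
theorem mem_iff_pyGetD (xs : List Int) (x : Int) :
    x ∈ xs ↔ ∃ i : Int, 0 ≤ i ∧ i < (xs.length : Int) ∧ x = PySem.List.pyGetD xs i 0 := by
  constructor
  · intro hx
    obtain ⟨k, hk, rfl⟩ := List.mem_iff_getElem.mp hx
    refine ⟨(k : Int), by positivity, by exact_mod_cast hk, ?_⟩
    rw [PySem.List.pyGetD_natCast]
    simp [List.getD_eq_getElem?_getD, hk]
  · rintro ⟨i, h0, hlt, rfl⟩
    exact PySem.List.pyGetD_mem xs 0 ⟨by omega, hlt⟩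

-- elements of A's flatMap
theorem mem_A_iff (xs : List Int) (x : Int) :
    x ∈ (PySem.List.pyRange 0 (xs.length : Int) 1).flatMap (gA xs) ↔
      x ∈ xs ∨ ∃ i : Int, 1 ≤ i ∧ i < (xs.length : Int) - 1 ∧
        (PySem.List.pyGetD xs i 0 != PySem.List.pyGetD xs (i - 1) 0) = true ∧
        x = PySem.List.pyGetD xs i 0 - 1 := by
  simp only [List.mem_flatMap, PySem.List.mem_pyRange_one]
  constructor
  · rintro ⟨i, ⟨h0, hn⟩, hmem⟩
    unfold gA at hmem
    split_ifs at hmem with h1 h2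
    · simp only [List.mem_singleton] at hmem
      exact Or.inl (hmem ▸ PySem.List.pyGetD_mem xs 0 ⟨by omega, hn⟩)
    · simp only [List.mem_cons, List.not_mem_nil, or_false] at hmem
      rcases hmem with rfl | rfl
      · refine Or.inr ⟨i, ?_, ?_, h2, rfl⟩ <;>
          · simp only [beq_iff_eq, Bool.or_eq_true] at h1; rw [not_or] at h1; omega
      · exact Or.inl (PySem.List.pyGetD_mem xs 0 ⟨by omega, hn⟩)
    · simp only [List.mem_singleton] at hmem
      exact Or.inl (hmem ▸ PySem.List.pyGetD_mem xs 0 ⟨by omega, hn⟩)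
  · rintro (hx | ⟨i, h1, hn, hc, rfl⟩)
    · obtain ⟨i, h0, hlt, rfl⟩ := (mem_iff_pyGetD xs _).mp hx
      refine ⟨i, ⟨h0, hlt⟩, ?_⟩
      unfold gA
      split_ifs <;> simp
    · refine ⟨i, ⟨by omega, by omega⟩, ?_⟩
      unfold gA
      have h1' : (i == 0 || i == (xs.length : Int) - 1) = false := by
        simp only [Bool.or_eq_false_iff, beq_eq_false_iff_ne]
        omega
      rw [h1', if_neg (by simp), if_pos hc]
      simp

-- elements of B's result coincide with elements of A's flatMap
theorem mem_B_iff (xs : List Int) (x : Int) :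
    x ∈ append_middle_buffer_frames_alt xs ↔
      x ∈ (PySem.List.pyRange 0 (xs.length : Int) 1).flatMap (gA xs) := by
  unfold append_middle_buffer_frames_alt
  rw [(foldl_ins_spec _ [] (by simp)).2 x, mem_A_iff]
  simp only [List.not_mem_nil, false_or]
  constructor
  · rintro ⟨p, hp, hx⟩
    obtain ⟨k, hk, rfl⟩ := (PySem.List.mem_enumerate_iff _ _ _).mp hp
    simp only [zero_add] at hx ⊢
    have hget : PySem.List.pyGetD xs (k : Int) 0 = xs[k] := by
      rw [PySem.List.pyGetD_natCast]; simp [List.getD_eq_getElem?_getD, hk]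
    rcases hx with rfl | ⟨hc, rfl⟩
    · exact Or.inl (List.mem_iff_getElem.mpr ⟨k, hk, rfl⟩)
    · simp only [Bool.and_eq_true, decide_eq_true_eq] at hc
      exact Or.inr ⟨(k : Int), by omega, by omega, by rw [hget]; exact hc.2, by rw [hget]⟩
  · rintro (hx | ⟨i, h1, hn, hc, rfl⟩)
    · obtain ⟨k, hk, rfl⟩ := List.mem_iff_getElem.mp hx
      refine ⟨((k : Int), xs[k]), (PySem.List.mem_enumerate_iff _ _ _).mpr ⟨k, hk, by simp⟩, Or.inl rfl⟩
    · have hi0 : 0 ≤ i := by omega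
      obtain ⟨k, rfl⟩ : ∃ k : Nat, (k : Int) = i := ⟨i.toNat, Int.toNat_of_nonneg hi0⟩
      have hk : k < xs.length := by omega
      have hget : PySem.List.pyGetD xs (k : Int) 0 = xs[k] := by
        rw [PySem.List.pyGetD_natCast]; simp [List.getD_eq_getElem?_getD, hk]
      refine ⟨((k : Int), xs[k]), (PySem.List.mem_enumerate_iff _ _ _).mpr ⟨k, hk, by simp⟩,
        Or.inr ⟨?_, by rw [hget]⟩⟩
      simp only [Bool.and_eq_true, decide_eq_true_eq]
      exact ⟨⟨by omega, by omega⟩, hget ▸ hc⟩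

theorem pairwise_B (xs : List Int) :
    (append_middle_buffer_frames_alt xs).Pairwise (· < ·) := by
  unfold append_middle_buffer_frames_alt
  exact (foldl_ins_spec _ [] (by simp)).1

theorem append_middle_buffer_frames_eq (xs : List Int) :
    append_middle_buffer_frames xs = append_middle_buffer_frames_alt xs := by
  unfold append_middle_buffer_frames
  simp only []
  rw [foldA_eq_flatMap]
  apply PySem.List.sorted_eq_of_perm_of_pairwise_lt
  · apply (List.perm_ext_iff_of_nodup (pairwise_B xs).nodup (PySem.Set.nodup_ofList _)).mpr
    intro x
    rw [PySem.Set.mem_ofList, mem_B_iff]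
  · exact pairwise_B xs

-- ===== VERDICT (by name: the statement is the Claim_ definition above) =====
theorem append_middle_buffer_frames_spec : Claim_equal_append_middle_buffer_frames := by
  intro xs _
  unfold Spec_append_middle_buffer_frames
  exact append_middle_buffer_frames_eq xs
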